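-- pv_equiv track=rewrite | github.com/Dauntess-Alexandro/40kAI | gym_mod/gym_mod/envs/warhamEnv.py | _ring_positions
-- ===== SOURCE A (Python) =====
-- def _ring_positions(center, radius: int):
--     cx, cy = int(center[0]), int(center[1])
--     if radius == 0:
--         yield [cx, cy]
--         return
--     for dx in range(-radius, radius + 1):
--         for dy in range(-radius, radius + 1):
--             if max(abs(dx), abs(dy)) != radius:
--                 continue
--             yield [cx + dx, cy + dy]
-- ===== SOURCE B (Python) =====
-- def _ring_positions(center, radius: int):
--     cx, cy = int(center[0]), int(center[1])
--     if radius == 0: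
--         yield [cx, cy]
--         return
--     # left column, then the two horizontal edges, then the right column,
--     # in the same order A's filtered square scan emits them
--     for dy in range(-radius, radius + 1):
--         yield [cx - radius, cy + dy]
--     for dx in range(-radius + 1, radius):
--         yield [cx + dx, cy - radius]
--         yield [cx + dx, cy + radius]
--     for dy in range(-radius, radius + 1):
--         yield [cx + radius, cy + dy]
-- ===== Notes on version B (the rewrite author's own statement) =====
-- stated objective: faster
-- what changed: Instead of scanning the full (2r+1)x(2r+1) square and filtering for Chebyshev distance r, B emits the perimeter directly: left column, two horizontal edges, right column, in A's order.
import Mathlib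
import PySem

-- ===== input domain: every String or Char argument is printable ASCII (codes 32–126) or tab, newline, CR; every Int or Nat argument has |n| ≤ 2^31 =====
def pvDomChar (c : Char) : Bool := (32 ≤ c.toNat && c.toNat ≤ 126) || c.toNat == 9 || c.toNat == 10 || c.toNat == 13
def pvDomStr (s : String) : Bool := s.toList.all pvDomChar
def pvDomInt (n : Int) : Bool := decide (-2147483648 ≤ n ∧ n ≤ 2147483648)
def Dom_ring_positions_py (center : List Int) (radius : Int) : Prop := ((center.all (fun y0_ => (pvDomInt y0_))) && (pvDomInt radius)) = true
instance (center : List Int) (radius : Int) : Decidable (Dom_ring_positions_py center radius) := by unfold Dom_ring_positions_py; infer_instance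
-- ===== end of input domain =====

-- B replaces A's filtered full-square scan by a direct O(radius) perimeter walk (same output order).


-- ===== PORT A =====
def ring_positions_py (center : List Int) (radius : Int) : List (List Int) :=
  let cx := PySem.List.pyGetD center 0 0
  let cy := PySem.List.pyGetD center 1 0
  if radius = 0 then [[cx, cy]]
  else
    (PySem.List.pyRange (-radius) (radius + 1) 1).foldl (fun acc dx =>
      (PySem.List.pyRange (-radius) (radius + 1) 1).foldl (fun acc2 dy =>
        if max |dx| |dy| ≠ radius then acc2
        else acc2 ++ [[cx + dx, cy + dy]]) acc) []

-- ===== PORT B =====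
def ring_positions_py_alt (center : List Int) (radius : Int) : List (List Int) :=
  let cx := PySem.List.pyGetD center 0 0
  let cy := PySem.List.pyGetD center 1 0
  if radius = 0 then [[cx, cy]]
  else
    (PySem.List.pyRange (-radius) (radius + 1) 1).map (fun dy => [cx - radius, cy + dy])
    ++ (PySem.List.pyRange (-radius + 1) radius 1).flatMap
        (fun dx => [[cx + dx, cy - radius], [cx + dx, cy + radius]])
    ++ (PySem.List.pyRange (-radius) (radius + 1) 1).map (fun dy => [cx + radius, cy + dy])

-- ===== PRECONDITION & SPEC =====
-- Pre_ excludes only inputs on which Python A raises IndexError (center shorter than 2).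
def Pre_ring_positions_py (center : List Int) (radius : Int) : Prop := 2 ≤ center.length
instance (center : List Int) (radius : Int) : Decidable (Pre_ring_positions_py center radius) := by unfold Pre_ring_positions_py; infer_instance
def pvWitness_ring_positions_py : List Int × Int := ([0, 0], 2)
def Spec_ring_positions_py (center : List Int) (radius : Int) (out : List (List Int)) : Prop := out = ring_positions_py_alt center radius
instance (center : List Int) (radius : Int) (out : List (List Int)) : Decidable (Spec_ring_positions_py center radius out) := by unfold Spec_ring_positions_py; infer_instance

-- ===== CLAIM (what is proved, stated in full; the proofs are below) =====
def Claim_equal_ring_positions_py : Prop := ∀ (center : List Int) (radius : Int), Dom_ring_positions_py center radius → Pre_ring_positions_py center radius → Spec_ring_positions_py center radius (ring_positions_py center radius)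

-- ===== LEMMAS AND PROOFS =====

-- The square's dy-range splits into left endpoint, interior, right endpoint (r > 0).
theorem ring_range_split (r : Int) (hr : 0 < r) :
    PySem.List.pyRange (-r) (r + 1) 1
      = -r :: (PySem.List.pyRange (-r + 1) r 1 ++ [r]) := by
  rw [PySem.List.pyRange_one_cons (by omega)]
  rw [PySem.List.pyRange_one_succ_right (by omega)]

-- The inner dy-loop of A, rewritten as filter-then-map appended to the accumulator.
theorem ring_inner_loop (cx cy r dx : Int) (acc : List (List Int)) :
    (PySem.List.pyRange (-r) (r + 1) 1).foldl (fun acc2 dy =>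
        if max |dx| |dy| ≠ r then acc2 else acc2 ++ [[cx + dx, cy + dy]]) acc
      = acc ++ ((PySem.List.pyRange (-r) (r + 1) 1).filter
            (fun dy => max |dx| |dy| = r)).map (fun dy => [cx + dx, cy + dy]) := by
  rw [PySem.List.foldl_congr_mem _ _ (fun acc2 dy =>
        if max |dx| |dy| = r then acc2 ++ [[cx + dx, cy + dy]] else acc2) _
      (by intro a x _; by_cases h : max |dx| |x| = r <;> simp [h])]
  exact PySem.List.foldl_append_ite _ _ _ _

-- At an edge column (|dx| = r), the filter keeps every dy of the range.
theorem ring_filter_edge (r dx : Int) (hdx : |dx| = r) :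
    (PySem.List.pyRange (-r) (r + 1) 1).filter (fun dy => max |dx| |dy| = r)
      = PySem.List.pyRange (-r) (r + 1) 1 := by
  apply List.filter_eq_self.mpr
  intro dy hmem
  rw [PySem.List.mem_pyRange_one] at hmem
  have h1 : |dy| ≤ r := abs_le.mpr ⟨hmem.1, by omega⟩
  simp [hdx, max_eq_left h1]

-- At an interior column (|dx| < r), the filter keeps only dy = ±r.
theorem ring_filter_interior (r dx : Int) (hr : 0 < r) (hdx : |dx| < r) :
    (PySem.List.pyRange (-r) (r + 1) 1).filter (fun dy => max |dx| |dy| = r)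
      = [-r, r] := by
  rw [ring_range_split r hr, List.filter_cons, List.filter_append]
  have habs : |(-r)| = r := by rw [abs_neg, abs_of_pos hr]
  have hmid : (PySem.List.pyRange (-r + 1) r 1).filter (fun dy => max |dx| |dy| = r) = [] := by
    apply List.filter_eq_nil_iff.mpr
    intro dy hmem
    rw [PySem.List.mem_pyRange_one] at hmem
    have h1 : |dy| < r := abs_lt.mpr ⟨by omega, hmem.2⟩
    simp only [decide_eq_true_eq]
    omega
  simp [habs, hmid, abs_of_pos hr, le_of_lt hdx]

-- flatMap over the dx-range split as head, interior, last (r > 0); keeps inner occurrences of the range intact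
theorem ring_flatMap_split (r : Int) (hr : 0 < r) (g : Int → List (List Int)) :
    (PySem.List.pyRange (-r) (r + 1) 1).flatMap g
      = g (-r) ++ (PySem.List.pyRange (-r + 1) r 1).flatMap g ++ g r := by
  rw [ring_range_split r hr]
  simp

theorem ring_positions_eq (center : List Int) (radius : Int) :
    ring_positions_py center radius = ring_positions_py_alt center radius := by
  unfold ring_positions_py ring_positions_py_alt
  by_cases h0 : radius = 0
  · simp [h0]
  · simp only [if_neg h0]
    by_cases hneg : radius < 0
    · rw [PySem.List.pyRange_one_eq_nil (by omega), PySem.List.pyRange_one_eq_nil (by omega)]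
      simp
    · have hr : 0 < radius := by omega
      set cx := PySem.List.pyGetD center 0 0 with hcx
      set cy := PySem.List.pyGetD center 1 0 with hcy
      -- collapse A's nested loops to a flatMap of filtered columns
      rw [PySem.List.foldl_congr_mem _ _ (fun acc dx => acc ++
            ((PySem.List.pyRange (-radius) (radius + 1) 1).filter
              (fun dy => decide (max |dx| |dy| = radius))).map (fun dy => [cx + dx, cy + dy])) _
          (by intro a x _; exact ring_inner_loop cx cy radius x a)]
      rw [PySem.List.foldl_append_eq_flatMap]
      rw [ring_flatMap_split radius hr]
      have habs : |(-radius)| = radius := by rw [abs_neg, abs_of_pos hr]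
      rw [ring_filter_edge radius (-radius) habs,
          ring_filter_edge radius radius (abs_of_pos hr)]
      have hmid : (PySem.List.pyRange (-radius + 1) radius 1).flatMap (fun dx =>
            ((PySem.List.pyRange (-radius) (radius + 1) 1).filter
              (fun dy => max |dx| |dy| = radius)).map (fun dy => [cx + dx, cy + dy]))
          = (PySem.List.pyRange (-radius + 1) radius 1).flatMap
            (fun dx => [[cx + dx, cy - radius], [cx + dx, cy + radius]]) := by
        apply List.flatMap_congr
        intro dx hmem
        rw [PySem.List.mem_pyRange_one] at hmem
        have hdx : |dx| < radius := abs_lt.mpr ⟨by omega, hmem.2⟩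
        rw [ring_filter_interior radius dx hr hdx]
        simp [sub_eq_add_neg]
      rw [hmid]
      simp [sub_eq_add_neg]

-- ===== VERDICT (by name: the statement is the Claim_ definition above) =====
theorem ring_positions_py_spec : Claim_equal_ring_positions_py := by
  intro center radius _ _
  exact ring_positions_eq center radius
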